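-- pv_equiv track=rewrite | github.com/Debkumarkatwa/Sabudh-Internship-Workflow | Python/Week 1/Lists.py | Remove_Specific_Elements
-- ===== SOURCE A (Python) =====
-- def Remove_Specific_Elements(List:list) -> list:
--     if not List:
--         return []
--
--     indices_to_remove = {0, 4, 5}
--     result = []
--     for i in range(len(List)):
--         if i not in indices_to_remove:
--             result.append(List[i])
--
--     return result
-- ===== SOURCE B (Python) =====
-- def Remove_Specific_Elements(List: list) -> list:
--     # keep indices 1..3, then 6.. : closed-form slices, no loop or index set
--     return List[1:4] + List[6:]
-- ===== Notes on version B (the rewrite author's own statement) =====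
-- stated objective: simpler
-- what changed: Replaced the index loop with a {0,4,5} membership set by the closed-form slice concatenation List[1:4] + List[6:].
import Mathlib
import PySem

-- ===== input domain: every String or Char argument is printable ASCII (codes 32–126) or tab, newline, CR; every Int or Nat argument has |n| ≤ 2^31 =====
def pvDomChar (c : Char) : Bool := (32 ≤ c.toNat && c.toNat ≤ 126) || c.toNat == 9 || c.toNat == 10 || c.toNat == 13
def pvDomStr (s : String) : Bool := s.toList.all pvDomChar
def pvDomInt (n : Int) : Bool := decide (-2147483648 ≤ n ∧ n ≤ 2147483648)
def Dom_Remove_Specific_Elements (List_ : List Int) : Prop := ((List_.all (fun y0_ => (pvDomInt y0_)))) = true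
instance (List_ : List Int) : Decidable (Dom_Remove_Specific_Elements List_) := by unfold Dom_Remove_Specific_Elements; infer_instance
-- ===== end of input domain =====

-- B replaces A's index loop with the {0,4,5} membership set by the closed-form
-- slice concatenation List[1:4] + List[6:] (simpler; same result on every input).

-- ===== PORT A =====
-- literal port of A: empty guard, the set {0, 4, 5}, loop over range(len(List)) appending kept elements
def removeSet_A : PySem.Set Int := PySem.Set.ofList [0, 4, 5]

def Remove_Specific_Elements (List_ : List Int) : List Int :=
  if List_ = [] then []
  else
    (PySem.List.pyRange 0 (PySem.List.len List_) 1).foldl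
      (fun result i =>
        if i ∉ removeSet_A then result ++ [PySem.List.pyGetD List_ i 0] else result)
      []

-- ===== PORT B =====
def Remove_Specific_Elements_alt (List_ : List Int) : List Int :=
  PySem.List.slice List_ (some 1) (some 4) ++ PySem.List.slice List_ (some 6) none

-- ===== PRECONDITION & SPEC =====
def Spec_Remove_Specific_Elements (List_ : List Int) (out : List Int) : Prop := out = Remove_Specific_Elements_alt List_
instance (List_ : List Int) (out : List Int) : Decidable (Spec_Remove_Specific_Elements List_ out) := by unfold Spec_Remove_Specific_Elements; infer_instance

-- ===== CLAIM (what is proved, stated in full; the proofs are below) =====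
def Claim_equal_Remove_Specific_Elements : Prop := ∀ (List_ : List Int), Dom_Remove_Specific_Elements List_ → Spec_Remove_Specific_Elements List_ (Remove_Specific_Elements List_)

-- ===== LEMMAS AND PROOFS =====

-- A's loop over the first six indices keeps exactly indices 1, 2, 3
theorem rse_first_six (a b c d e f : Int) (t : List Int) :
    List.foldl (fun result i =>
        if i ∉ removeSet_A then result ++ [PySem.List.pyGetD (a :: b :: c :: d :: e :: f :: t) i 0] else result)
      [] (PySem.List.pyRange 0 6 1) = [b, c, d] := by
  rw [show PySem.List.pyRange 0 6 1 = [0,1,2,3,4,5] from by decide]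
  simp only [List.foldl]
  norm_num [removeSet_A, PySem.Set.mem_ofList, PySem.List.pyGetD, PySem.List.pyGet?,
    PySem.List.pyIdx?, (show Int.toNat 2 = 2 from rfl), (show Int.toNat 3 = 3 from rfl), (show Int.toNat 4 = 4 from rfl)]
  refine ⟨by rw [if_pos (by omega)]; simp, by rw [if_pos (by omega)]; simp,
    by rw [if_pos (by omega)]; simp⟩

-- the long case: a list with at least six elements
theorem rse_long (a b c d e f : Int) (t : List Int) :
    Remove_Specific_Elements (a :: b :: c :: d :: e :: f :: t)
      = Remove_Specific_Elements_alt (a :: b :: c :: d :: e :: f :: t) := by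
  set L : List Int := a :: b :: c :: d :: e :: f :: t with hL
  have hlen : PySem.List.len L = 6 + (t.length : Int) := by
    simp [PySem.List.len_eq, hL]; omega
  have hsplit : PySem.List.pyRange 0 (PySem.List.len L) 1
      = PySem.List.pyRange 0 6 1 ++ PySem.List.pyRange 6 (PySem.List.len L) 1 := by
    apply PySem.List.pyRange_one_append 0 6 _ (by omega)
    rw [hlen]; omega
  have hne : L ≠ [] := by simp [hL]
  unfold Remove_Specific_Elements
  rw [if_neg hne, hsplit, List.foldl_append, hL, rse_first_six, ← hL]
  have hcongr : (PySem.List.pyRange 6 (PySem.List.len L) 1).foldl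
      (fun result i => if i ∉ removeSet_A then result ++ [PySem.List.pyGetD L i 0] else result)
      [b, c, d]
      = (PySem.List.pyRange 6 (PySem.List.len L) 1).foldl
      (fun result i => result ++ [PySem.List.pyGetD L i 0]) [b, c, d] := by
    apply PySem.List.foldl_congr_mem
    intro acc x hx
    have hx6 : (6 : Int) ≤ x := (PySem.List.mem_pyRange_one.mp hx).1
    have hnotin : x ∉ removeSet_A := by
      rw [removeSet_A, PySem.Set.mem_ofList]
      intro hmem
      simp at hmem
      omega
    rw [if_pos hnotin]
  rw [hcongr,
    PySem.List.foldl_pyRange_pyGetD L 0 (fun acc x => acc ++ [x]) [b, c, d] (by omega),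
    PySem.List.foldl_append_singleton]
  unfold Remove_Specific_Elements_alt
  rw [show ((1 : Int)) = ((1 : Nat) : Int) from by norm_num,
    show ((4 : Int)) = ((4 : Nat) : Int) from by norm_num,
    show ((6 : Int)) = ((6 : Nat) : Int) from by norm_num,
    PySem.List.slice_natCast, PySem.List.slice_from_natCast]
  simp [hL]

theorem Remove_Specific_Elements_eq (List_ : List Int) :
    Remove_Specific_Elements List_ = Remove_Specific_Elements_alt List_ := by
  match List_ with
  | [] => decide
  | [a] =>
    rw [Remove_Specific_Elements, Remove_Specific_Elements_alt, if_neg (by simp),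
      show PySem.List.len [a] = 1 from by simp [PySem.List.len_eq],
      show PySem.List.pyRange 0 1 1 = [0] from by decide]
    simp only [List.foldl]
    norm_num [removeSet_A, PySem.Set.mem_ofList, PySem.List.slice, PySem.List.clampIdx,
      PySem.List.pyGetD, PySem.List.pyGet?, PySem.List.pyIdx?, (show Int.toNat 2 = 2 from rfl), (show Int.toNat 3 = 3 from rfl), (show Int.toNat 4 = 4 from rfl)]
  | [a, b] =>
    rw [Remove_Specific_Elements, Remove_Specific_Elements_alt, if_neg (by simp),
      show PySem.List.len [a, b] = 2 from by simp [PySem.List.len_eq],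
      show PySem.List.pyRange 0 2 1 = [0, 1] from by decide]
    simp only [List.foldl]
    norm_num [removeSet_A, PySem.Set.mem_ofList, PySem.List.slice, PySem.List.clampIdx,
      PySem.List.pyGetD, PySem.List.pyGet?, PySem.List.pyIdx?, (show Int.toNat 2 = 2 from rfl), (show Int.toNat 3 = 3 from rfl), (show Int.toNat 4 = 4 from rfl)]
  | [a, b, c] =>
    rw [Remove_Specific_Elements, Remove_Specific_Elements_alt, if_neg (by simp),
      show PySem.List.len [a, b, c] = 3 from by simp [PySem.List.len_eq],
      show PySem.List.pyRange 0 3 1 = [0, 1, 2] from by decide]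
    simp only [List.foldl]
    norm_num [removeSet_A, PySem.Set.mem_ofList, PySem.List.slice, PySem.List.clampIdx,
      PySem.List.pyGetD, PySem.List.pyGet?, PySem.List.pyIdx?, (show Int.toNat 2 = 2 from rfl), (show Int.toNat 3 = 3 from rfl), (show Int.toNat 4 = 4 from rfl)]
  | [a, b, c, d] =>
    rw [Remove_Specific_Elements, Remove_Specific_Elements_alt, if_neg (by simp),
      show PySem.List.len [a, b, c, d] = 4 from by simp [PySem.List.len_eq],
      show PySem.List.pyRange 0 4 1 = [0, 1, 2, 3] from by decide]
    simp only [List.foldl]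
    norm_num [removeSet_A, PySem.Set.mem_ofList, PySem.List.slice, PySem.List.clampIdx,
      PySem.List.pyGetD, PySem.List.pyGet?, PySem.List.pyIdx?, (show Int.toNat 2 = 2 from rfl), (show Int.toNat 3 = 3 from rfl), (show Int.toNat 4 = 4 from rfl)]
  | [a, b, c, d, e] =>
    rw [Remove_Specific_Elements, Remove_Specific_Elements_alt, if_neg (by simp),
      show PySem.List.len [a, b, c, d, e] = 5 from by simp [PySem.List.len_eq],
      show PySem.List.pyRange 0 5 1 = [0, 1, 2, 3, 4] from by decide]
    simp only [List.foldl]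
    norm_num [removeSet_A, PySem.Set.mem_ofList, PySem.List.slice, PySem.List.clampIdx,
      PySem.List.pyGetD, PySem.List.pyGet?, PySem.List.pyIdx?, (show Int.toNat 2 = 2 from rfl), (show Int.toNat 3 = 3 from rfl), (show Int.toNat 4 = 4 from rfl)]
  | a :: b :: c :: d :: e :: f :: t => exact rse_long a b c d e f t

-- ===== VERDICT (by name: the statement is the Claim_ definition above) =====
theorem Remove_Specific_Elements_spec : Claim_equal_Remove_Specific_Elements := by
  intro L _
  unfold Spec_Remove_Specific_Elements
  exact Remove_Specific_Elements_eq L
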